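-- pv_equiv track=rewrite | github.com/WilliamRossiter/adventofcode | 2020/day_1.py | FGetSubArrayWithSum
-- ===== SOURCE A (Python) =====
-- def FGetSubArrayWithSum(aryN, cN, nSum, aryNFinal):
--     if cN == 1:
--         for n in aryN:
--             if n == nSum:
--                 aryNFinal.append(n)
--                 return True
--     else:
--         for i in range(len(aryN)):
--             aryNOther = list(aryN)
--             n = aryNOther.pop(i)
--             if FGetSubArrayWithSum(aryNOther, cN - 1, nSum - n, aryNFinal):
--                 aryNFinal.append(n)
--                 return True
--     return False
-- ===== SOURCE B (Python) =====
-- import itertools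
--
-- def FGetSubArrayWithSum(aryN, cN, nSum, aryNFinal):
--     if cN < 1 or cN > len(aryN):
--         return False
--     for combo in itertools.permutations(aryN, cN):
--         if sum(combo) == nSum:
--             aryNFinal.extend(reversed(combo))
--             return True
--     return False
-- ===== Notes on version B (the rewrite author's own statement) =====
-- stated objective: simpler
-- what changed: Replaces the hand-written recursive backtracking with a single flat loop over itertools.permutations(aryN, cN) that returns on the first combination summing to nSum (with a cN<1 guard, since A never succeeds for cN<=0); the reversed extend reproduces A's append order.
import Mathlib
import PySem

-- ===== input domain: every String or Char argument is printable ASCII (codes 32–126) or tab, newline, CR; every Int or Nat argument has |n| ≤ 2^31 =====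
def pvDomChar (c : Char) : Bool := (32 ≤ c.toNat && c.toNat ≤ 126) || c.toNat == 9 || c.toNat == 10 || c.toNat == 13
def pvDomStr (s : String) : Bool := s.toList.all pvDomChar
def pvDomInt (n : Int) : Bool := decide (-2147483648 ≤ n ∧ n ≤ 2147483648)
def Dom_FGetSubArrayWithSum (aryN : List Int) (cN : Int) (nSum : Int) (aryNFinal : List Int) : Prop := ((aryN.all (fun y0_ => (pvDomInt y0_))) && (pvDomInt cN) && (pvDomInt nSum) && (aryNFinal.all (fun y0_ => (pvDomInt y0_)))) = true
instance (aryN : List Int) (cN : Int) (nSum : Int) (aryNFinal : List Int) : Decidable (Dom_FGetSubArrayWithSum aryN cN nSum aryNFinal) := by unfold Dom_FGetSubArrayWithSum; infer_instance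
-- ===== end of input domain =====

-- B replaces A's recursive backtracking by one flat scan over the permutation list (same cost);
-- both Pythons also append the found combination to aryNFinal in the same order (same side effect),
-- but the equivalence proved here is about the returned Bool only.

-- ===== PORT A =====
-- Literal port of A's recursion; the `for i in range(len(aryN))` loop with early return becomes
-- `any` over the attached index range (attach only carries the i < len proof for termination);
-- since i is always in range, `aryN[i]!`/`eraseIdx` are exactly Python's `aryNOther.pop(i)`.
-- aryNFinal is threaded but, as in Python, never affects the returned Bool.
def FGetSubArrayWithSum (aryN : List Int) (cN : Int) (nSum : Int) (aryNFinal : List Int) : Bool :=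
  if cN == 1 then
    aryN.any (fun n => n == nSum)
  else
    (List.range aryN.length).attach.any (fun ⟨i, hi⟩ =>
      FGetSubArrayWithSum (aryN.eraseIdx i) (cN - 1) (nSum - aryN[i]!) aryNFinal)
termination_by aryN.length
decreasing_by
  have : i < aryN.length := List.mem_range.mp hi
  simp [List.length_eraseIdx, this]
  omega

-- ===== PORT B =====
-- itertools.permutations(xs, k) in Python's order (lexicographic in the picked positions)
def pvPerms (xs : List Int) (k : Nat) : List (List Int) :=
  match k with
  | 0 => [[]]
  | k + 1 => (List.range xs.length).flatMap (fun i =>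
      (pvPerms (xs.eraseIdx i) k).map (fun c => xs[i]! :: c))

def FGetSubArrayWithSum_alt (aryN : List Int) (cN : Int) (nSum : Int) (aryNFinal : List Int) : Bool :=
  if cN < 1 ∨ (aryN.length : Int) < cN then false
  else (pvPerms aryN cN.toNat).any (fun c => c.sum == nSum)

-- ===== PRECONDITION & SPEC =====
def Spec_FGetSubArrayWithSum (aryN : List Int) (cN : Int) (nSum : Int) (aryNFinal : List Int) (out : Bool) : Prop := out = FGetSubArrayWithSum_alt aryN cN nSum aryNFinal
instance (aryN : List Int) (cN : Int) (nSum : Int) (aryNFinal : List Int) (out : Bool) : Decidable (Spec_FGetSubArrayWithSum aryN cN nSum aryNFinal out) := by unfold Spec_FGetSubArrayWithSum; infer_instance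

-- ===== CLAIM (what is proved, stated in full; the proofs are below) =====
def Claim_equal_FGetSubArrayWithSum : Prop := ∀ (aryN : List Int) (cN : Int) (nSum : Int) (aryNFinal : List Int), Dom_FGetSubArrayWithSum aryN cN nSum aryNFinal → Spec_FGetSubArrayWithSum aryN cN nSum aryNFinal (FGetSubArrayWithSum aryN cN nSum aryNFinal)

-- ===== LEMMAS AND PROOFS =====

-- For cN ≤ 0, A always fails (it recurses on ever shorter lists and returns False).
lemma A_nonpos (n : Nat) : ∀ (xs : List Int), xs.length = n → ∀ (cN s : Int) (f : List Int), cN ≤ 0 →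
    FGetSubArrayWithSum xs cN s f = false := by
  induction n using Nat.strong_induction_on with
  | _ n IH =>
    intro xs hn cN s f hc
    rw [FGetSubArrayWithSum]
    have h1 : (cN == 1) = false := by simp; omega
    rw [h1]
    simp only [Bool.false_eq_true, if_false, List.any_eq_false]
    rintro ⟨i, hi⟩ -
    have hilt : i < xs.length := List.mem_range.mp hi
    simp only [Bool.not_eq_true]
    exact IH (n - 1) (by omega) _ (by rw [List.length_eraseIdx_of_lt hilt]; omega) (cN - 1) _ f (by omega)

lemma perms_one (xs : List Int) (s : Int) :
    (pvPerms xs 1).any (fun c => c.sum == s) = xs.any (fun x => x == s) := by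
  rw [Bool.eq_iff_iff]
  simp only [pvPerms, List.any_eq_true, List.mem_flatMap, List.mem_range, List.mem_map,
    List.mem_singleton]
  constructor
  · rintro ⟨c, ⟨i, hi, ⟨c', hc', rfl⟩⟩, h⟩
    subst hc'
    exact ⟨xs[i]!, by simp [List.getElem!_eq_getElem?_getD, List.getElem?_eq_getElem hi, List.getElem_mem hi], by simpa using h⟩
  · rintro ⟨x, hx, h⟩
    obtain ⟨i, hi, rfl⟩ := List.mem_iff_getElem.mp hx
    exact ⟨[xs[i]], ⟨i, hi, ⟨[], rfl, by simp [List.getElem!_eq_getElem?_getD, List.getElem?_eq_getElem hi]⟩⟩, by simpa using h⟩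

-- For cN ≥ 1, A succeeds iff some length-cN permutation (in Python's order) sums to s.
lemma key (n : Nat) : ∀ (xs : List Int), xs.length = n → ∀ (cN s : Int) (f : List Int), 1 ≤ cN →
    FGetSubArrayWithSum xs cN s f = (pvPerms xs cN.toNat).any (fun c => c.sum == s) := by
  induction n using Nat.strong_induction_on with
  | _ n IH =>
    intro xs hn cN s f hc
    by_cases h1 : cN = 1
    · subst h1
      rw [FGetSubArrayWithSum]
      simp only [BEq.rfl, if_true]
      exact (perms_one xs s).symm
    · have h2 : 2 ≤ cN := by omega
      rw [FGetSubArrayWithSum]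
      have hb : (cN == 1) = false := by simp; omega
      rw [hb]
      simp only [Bool.false_eq_true, if_false]
      have hk : cN.toNat = (cN - 1).toNat + 1 := by omega
      rw [hk, Bool.eq_iff_iff]
      simp only [pvPerms, List.any_eq_true, List.mem_flatMap, List.mem_range, List.mem_map,
        List.mem_attach, true_and, Subtype.exists]
      constructor
      · rintro ⟨i, hilt, hrec⟩
        rw [IH (n-1) (by omega) _ (by rw [List.length_eraseIdx_of_lt hilt]; omega) _ _ _ (by omega)] at hrec
        simp only [List.any_eq_true] at hrec
        obtain ⟨c, hc', hsum⟩ := hrec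
        refine ⟨xs[i]! :: c, ⟨i, hilt, c, hc', rfl⟩, ?_⟩
        simp at hsum ⊢; omega
      · rintro ⟨_, ⟨i, hilt, c, hc', rfl⟩, hsum⟩
        refine ⟨i, hilt, ?_⟩
        rw [IH (n-1) (by omega) _ (by rw [List.length_eraseIdx_of_lt hilt]; omega) _ _ _ (by omega)]
        simp only [List.any_eq_true]
        refine ⟨c, hc', ?_⟩
        simp at hsum ⊢; omega

-- No length-k permutations exist when k exceeds the list's length.
lemma perms_nil (k : Nat) : ∀ (xs : List Int), xs.length < k → pvPerms xs k = [] := by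
  induction k with
  | zero => intro xs h; omega
  | succ k IH =>
    intro xs h
    rw [pvPerms]
    apply List.flatMap_eq_nil_iff.mpr
    intro i hi
    have hilt : i < xs.length := List.mem_range.mp hi
    rw [IH _ (by rw [List.length_eraseIdx_of_lt hilt]; omega)]
    rfl

-- ===== VERDICT (by name: the statement is the Claim_ definition above) =====
theorem FGetSubArrayWithSum_spec : Claim_equal_FGetSubArrayWithSum := by
  intro aryN cN nSum aryNFinal _
  unfold Spec_FGetSubArrayWithSum FGetSubArrayWithSum_alt
  by_cases hc : cN < 1 ∨ (aryN.length : Int) < cN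
  · rw [if_pos hc]
    rcases hc with hc | hc
    · exact A_nonpos aryN.length aryN rfl cN nSum aryNFinal (by omega)
    · by_cases hc1 : cN < 1
      · exact A_nonpos aryN.length aryN rfl cN nSum aryNFinal (by omega)
      · rw [key aryN.length aryN rfl cN nSum aryNFinal (by omega),
            perms_nil cN.toNat aryN (by omega)]
        rfl
  · rw [if_neg hc]
    exact key aryN.length aryN rfl cN nSum aryNFinal (by omega)
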